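-- pv_equiv track=rewrite | github.com/hamid-amir/CueWords | data_creation/gender_agreement.py | make_balance
-- ===== SOURCE A (Python) =====
-- def make_balance(examples):
--   min_cues = 2
--   max_cues = 6
--   lenghts = {f'{i}':0 for i in range(min_cues, max_cues+1)}
--   for cues_list in examples['cue_words']:
--     if min_cues <= len(cues_list) <= max_cues:
--       lenghts[str(len(cues_list))] += 1
--
--   balance_size = min(lenghts.values())
--
--   return {'balance_size':[balance_size]*len(examples['cue_words'])}
-- ===== SOURCE B (Python) =====
-- def make_balance(examples):
--   cue_words = examples['cue_words']
--   balance_size = min(sum(1 for c in cue_words if len(c) == i) for i in range(2, 7))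
--   return {'balance_size': [balance_size] * len(cue_words)}
-- ===== Notes on version B (the rewrite author's own statement) =====
-- stated objective: alternative
-- what changed: Replaces the mutable length->count dict populated in one pass by a min over per-bucket scans: for each target length 2..6 a 0/1 generator sum counts matching cue lists, and the minimum of those five counts is taken directly.
import Mathlib
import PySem

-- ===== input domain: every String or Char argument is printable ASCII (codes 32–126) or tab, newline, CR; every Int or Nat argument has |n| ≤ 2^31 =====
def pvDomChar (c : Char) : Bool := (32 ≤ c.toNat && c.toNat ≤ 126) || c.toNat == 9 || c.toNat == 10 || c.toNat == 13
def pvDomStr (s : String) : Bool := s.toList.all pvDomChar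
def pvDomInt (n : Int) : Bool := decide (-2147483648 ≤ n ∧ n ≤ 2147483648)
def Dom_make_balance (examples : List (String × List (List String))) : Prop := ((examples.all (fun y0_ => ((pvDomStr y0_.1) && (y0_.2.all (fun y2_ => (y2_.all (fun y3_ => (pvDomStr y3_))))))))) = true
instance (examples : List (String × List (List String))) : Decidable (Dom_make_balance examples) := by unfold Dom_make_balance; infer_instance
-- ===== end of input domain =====

-- B replaces A's single-pass mutable length->count dict by a min over five per-length scans (alternative decomposition, same O(n) cost).


-- ===== PORT A =====
-- one step of A's loop: lenghts[str(len(cues_list))] += 1 under the range guard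
def mbStep (d : PySem.Dict String Int) (cues_list : List String) : PySem.Dict String Int :=
  if 2 ≤ cues_list.length ∧ cues_list.length ≤ 6 then
    d.modify (PySem.Int.toStr (cues_list.length : Int)) 0 (· + 1)
  else d

def make_balance (examples : List (String × List (List String))) : List (String × List Int) :=
  match (PySem.Dict.mk examples).get? "cue_words" with
  | none => []   -- KeyError: excluded by Pre_
  | some cue_words =>
    let lenghts0 : PySem.Dict String Int :=
      (PySem.List.pyRange 2 7 1).foldl (fun d i => d.insert (PySem.Int.toStr i) 0) PySem.Dict.empty
    let lenghts := cue_words.foldl mbStep lenghts0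
    match PySem.List.min? lenghts.values (fun x => x) with
    | none => []   -- unreachable: lenghts always has five entries
    | some balance_size => [("balance_size", List.replicate cue_words.length balance_size)]

-- ===== PORT B =====
def make_balance_alt (examples : List (String × List (List String))) : List (String × List Int) :=
  match (PySem.Dict.mk examples).get? "cue_words" with
  | none => []   -- KeyError: excluded by Pre_
  | some cue_words =>
    let counts := (PySem.List.pyRange 2 7 1).map
      (fun i => (cue_words.map (fun c => if (c.length : Int) = i then (1 : Int) else 0)).sum)
    match PySem.List.min? counts (fun x => x) with
    | none => []   -- unreachable: counts always has five entries
    | some balance_size => [("balance_size", List.replicate cue_words.length balance_size)]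

-- ===== PRECONDITION & SPEC =====
-- Pre_ excludes exactly the inputs without a 'cue_words' key, on which A raises KeyError.
def Pre_make_balance (examples : List (String × List (List String))) : Prop :=
  ((PySem.Dict.mk examples).get? "cue_words").isSome = true
instance (examples : List (String × List (List String))) : Decidable (Pre_make_balance examples) := by unfold Pre_make_balance; infer_instance

def pvWitness_make_balance : (List (String × List (List String))) :=
  [("cue_words", [["a", "b"], ["c"], []])]

def Spec_make_balance (examples : List (String × List (List String))) (out : List (String × List Int)) : Prop := out = make_balance_alt examples
instance (examples : List (String × List (List String))) (out : List (String × List Int)) : Decidable (Spec_make_balance examples out) := by unfold Spec_make_balance; infer_instance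

-- ===== CLAIM (what is proved, stated in full; the proofs are below) =====
def Claim_equal_make_balance : Prop := ∀ (examples : List (String × List (List String))), Dom_make_balance examples → Pre_make_balance examples → Spec_make_balance examples (make_balance examples)

-- ===== LEMMAS AND PROOFS =====

-- count of cue lists of length exactly i
def mbCnt (cw : List (List String)) (i : Nat) : Int := (cw.countP (fun c => c.length = i) : Int)

lemma mb_fold_char (cw : List (List String)) (a2 a3 a4 a5 a6 : Int) :
    cw.foldl mbStep (PySem.Dict.mk [("2", a2), ("3", a3), ("4", a4), ("5", a5), ("6", a6)]) =
    PySem.Dict.mk [("2", a2 + mbCnt cw 2), ("3", a3 + mbCnt cw 3), ("4", a4 + mbCnt cw 4),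
                   ("5", a5 + mbCnt cw 5), ("6", a6 + mbCnt cw 6)] := by
  induction cw generalizing a2 a3 a4 a5 a6 with
  | nil => simp [mbCnt]
  | cons c cw ih =>
    simp only [List.foldl_cons]
    by_cases h : 2 ≤ c.length ∧ c.length ≤ 6
    · obtain ⟨h1, h2⟩ := h
      interval_cases hl : c.length
      · simp only [mbStep, hl]
        rw [show PySem.Int.toStr ((2 : Nat) : Int) = "2" from rfl]
        simp only [PySem.Dict.modify, PySem.Dict.get?, PySem.Dict.insert, PySem.Dict.getD,
          PySem.Dict.contains, List.find?]
        simp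
        rw [ih]
        simp [mbCnt, hl]
        ring
      · simp only [mbStep, hl]
        rw [show PySem.Int.toStr ((3 : Nat) : Int) = "3" from rfl]
        simp only [PySem.Dict.modify, PySem.Dict.get?, PySem.Dict.insert, PySem.Dict.getD,
          PySem.Dict.contains, List.find?]
        simp
        rw [ih]
        simp [mbCnt, hl]
        ring
      · simp only [mbStep, hl]
        rw [show PySem.Int.toStr ((4 : Nat) : Int) = "4" from rfl]
        simp only [PySem.Dict.modify, PySem.Dict.get?, PySem.Dict.insert, PySem.Dict.getD,
          PySem.Dict.contains, List.find?]
        simp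
        rw [ih]
        simp [mbCnt, hl]
        ring
      · simp only [mbStep, hl]
        rw [show PySem.Int.toStr ((5 : Nat) : Int) = "5" from rfl]
        simp only [PySem.Dict.modify, PySem.Dict.get?, PySem.Dict.insert, PySem.Dict.getD,
          PySem.Dict.contains, List.find?]
        simp
        rw [ih]
        simp [mbCnt, hl]
        ring
      · simp only [mbStep, hl]
        rw [show PySem.Int.toStr ((6 : Nat) : Int) = "6" from rfl]
        simp only [PySem.Dict.modify, PySem.Dict.get?, PySem.Dict.insert, PySem.Dict.getD,
          PySem.Dict.contains, List.find?]
        simp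
        rw [ih]
        simp [mbCnt, hl]
        ring
    · have hs : mbStep (PySem.Dict.mk [("2", a2), ("3", a3), ("4", a4), ("5", a5), ("6", a6)]) c =
          PySem.Dict.mk [("2", a2), ("3", a3), ("4", a4), ("5", a5), ("6", a6)] := by
        simp [mbStep, h]
      rw [hs, ih]
      have hne : ∀ i, 2 ≤ i → i ≤ 6 → ¬ c.length = i := by
        intro i hi1 hi2 he; exact h ⟨he ▸ hi1, he ▸ hi2⟩
      simp [mbCnt, hne 2 (by norm_num) (by norm_num),
        hne 3 (by norm_num) (by norm_num), hne 4 (by norm_num) (by norm_num),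
        hne 5 (by norm_num) (by norm_num), hne 6 (by norm_num) (by norm_num)]

lemma mb_sum_ite_eq_cnt (cw : List (List String)) (i : Nat) :
    (cw.map (fun c => if (c.length : Int) = (i : Int) then (1 : Int) else 0)).sum = mbCnt cw i := by
  induction cw with
  | nil => simp [mbCnt]
  | cons c cw ih =>
    by_cases hc : c.length = i
    · simp [mbCnt, hc] at *
      omega
    · have hc' : ¬ ((c.length : Int) = (i : Int)) := by exact_mod_cast hc
      simp [mbCnt, hc, hc'] at *
      omega

-- ===== VERDICT (by name: the statement is the Claim_ definition above) =====
theorem make_balance_spec : Claim_equal_make_balance := by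
  intro examples _ hpre
  obtain ⟨cw, hcw⟩ := Option.isSome_iff_exists.mp hpre
  unfold Spec_make_balance make_balance make_balance_alt
  rw [hcw]
  dsimp only
  have h0 : ((PySem.List.pyRange 2 7 1).foldl
      (fun d i => d.insert (PySem.Int.toStr i) 0) (PySem.Dict.empty : PySem.Dict String Int)) =
      PySem.Dict.mk [("2", 0), ("3", 0), ("4", 0), ("5", 0), ("6", 0)] := by decide
  rw [h0, mb_fold_char]
  have hr : PySem.List.pyRange 2 7 1 = [2, 3, 4, 5, 6] := by decide
  rw [hr]
  have e2 := mb_sum_ite_eq_cnt cw 2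
  have e3 := mb_sum_ite_eq_cnt cw 3
  have e4 := mb_sum_ite_eq_cnt cw 4
  have e5 := mb_sum_ite_eq_cnt cw 5
  have e6 := mb_sum_ite_eq_cnt cw 6
  norm_num at e2 e3 e4 e5 e6
  simp only [List.map_cons, List.map_nil, e2, e3, e4, e5, e6, PySem.Dict.values]
  norm_num
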